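-- pv_equiv track=rewrite | github.com/jeganpillai/python_reference | p0017_length_of_longest_substring_with_at_most_K_frequency.py | Grow_With_Data
-- ===== SOURCE A (Python) =====
-- def Grow_With_Data(nums, k):
--     freq = {}
--     left = 0
--     max_length = 0
--
--     for indx, val in enumerate(nums):
--         freq[val] = freq.get(val,0) + 1
--         while freq[val] > k:
--             freq[nums[left]] -= 1
--             left += 1
--         max_length = max(max_length, indx - left + 1 )
--     return max_length
-- ===== SOURCE B (Python) =====
-- def Grow_With_Data(nums, k):
--     best = 0
--     for r in range(len(nums)):
--         cnt = {}
--         l = r + 1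
--         for l0 in range(r, -1, -1):
--             c = cnt.get(nums[l0], 0) + 1
--             cnt[nums[l0]] = c
--             if c > k:
--                 break
--             l = l0
--         best = max(best, r - l + 1)
--     return best
-- ===== Notes on version B (the rewrite author's own statement) =====
-- stated objective: alternative
-- what changed: A's amortized two-pointer sliding window with one incrementally maintained frequency dict is replaced by an independent rescan per end index: for each r, B rebuilds a fresh counter extending the window backward from r and stops at the first start whose inclusion would push a count above k.
import Mathlib
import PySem

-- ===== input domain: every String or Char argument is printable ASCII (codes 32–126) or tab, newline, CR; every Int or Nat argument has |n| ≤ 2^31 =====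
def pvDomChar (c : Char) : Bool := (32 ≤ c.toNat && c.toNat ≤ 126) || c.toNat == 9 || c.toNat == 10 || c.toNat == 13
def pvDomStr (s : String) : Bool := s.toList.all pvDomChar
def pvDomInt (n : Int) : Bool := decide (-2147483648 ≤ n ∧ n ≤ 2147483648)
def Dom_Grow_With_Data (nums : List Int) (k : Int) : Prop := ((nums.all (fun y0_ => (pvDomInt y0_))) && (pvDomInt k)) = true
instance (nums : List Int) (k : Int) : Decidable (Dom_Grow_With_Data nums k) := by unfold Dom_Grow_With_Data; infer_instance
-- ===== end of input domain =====

-- B replaces A's amortized two-pointer sliding window by a per-end-index rescan: for each r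
-- it rebuilds a fresh counter while extending the window backward from r until a count would
-- exceed k (objective: alternative, a genuinely different algorithm; B is slower).

-- ===== PORT A =====
-- the `while freq[val] > k` loop; the `else (freq, left)` branch at an out-of-range `left`
-- is where Python raises IndexError (those inputs are excluded by Pre_).
-- `freq[nums[left]] -= 1` is ported with getD 0: under Pre_ the key is always present.
def aShrink (nums : List Int) (k : Int) (val : Int) (freq : PySem.Dict Int Int) (left : Nat) :
    PySem.Dict Int Int × Nat :=
  if freq.getD val 0 > k then
    if h : left < nums.length then
      aShrink nums k val (freq.insert nums[left] (freq.getD nums[left] 0 - 1)) (left + 1)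
    else (freq, left)
  else (freq, left)
termination_by nums.length - left

-- one iteration of A's `for indx, val in enumerate(nums)` loop
def aStep (nums : List Int) (k : Int) (st : PySem.Dict Int Int × Nat × Int) (p : Int × Int) :
    PySem.Dict Int Int × Nat × Int :=
  let freq := (st.1).insert p.2 ((st.1).getD p.2 0 + 1)
  let res := aShrink nums k p.2 freq st.2.1
  (res.1, res.2, max st.2.2 (p.1 - (res.2 : Int) + 1))

def Grow_With_Data (nums : List Int) (k : Int) : Int :=
  ((PySem.List.enumerate nums).foldl (aStep nums k) (PySem.Dict.empty, 0, 0)).2.2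

-- ===== PORT B =====
-- the inner `for l0 in range(r, -1, -1)` loop with its break; `cnt` is the dict, `l` the
-- best start found so far (initially r+1). `nums[l0]` is ported with getD 0: every index
-- this loop visits is in range.
def bDown (nums : List Int) (k : Int) : List Nat → PySem.Dict Int Int → Nat → Nat
  | [], _, l => l
  | l0 :: rest, cnt, l =>
    let c := cnt.getD (nums.getD l0 0) 0 + 1
    let cnt' := cnt.insert (nums.getD l0 0) c
    if c > k then l else bDown nums k rest cnt' l0

def Grow_With_Data_alt (nums : List Int) (k : Int) : Int :=
  (List.range nums.length).foldl
    (fun (best : Int) (r : Nat) =>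
      max best ((r : Int)
        - (bDown nums k ((List.range (r + 1)).reverse) PySem.Dict.empty (r + 1) : Int) + 1)) 0

-- ===== PRECONDITION & SPEC =====
-- Pre_ excludes k < 0 with nonempty nums: there A's shrink loop runs `left` past the end of
-- nums and raises IndexError (A returns on no such input), while B returns 0.
def Pre_Grow_With_Data (nums : List Int) (k : Int) : Prop := nums = [] ∨ 0 ≤ k
instance (nums : List Int) (k : Int) : Decidable (Pre_Grow_With_Data nums k) := by
  unfold Pre_Grow_With_Data; infer_instance

def pvWitness_Grow_With_Data : List Int × Int := ([1, 2, 1, 2, 3], 1)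

def Spec_Grow_With_Data (nums : List Int) (k : Int) (out : Int) : Prop := out = Grow_With_Data_alt nums k
instance (nums : List Int) (k : Int) (out : Int) : Decidable (Spec_Grow_With_Data nums k out) := by unfold Spec_Grow_With_Data; infer_instance

-- ===== CLAIM (what is proved, stated in full; the proofs are below) =====
def Claim_equal_Grow_With_Data : Prop := ∀ (nums : List Int) (k : Int), Dom_Grow_With_Data nums k → Pre_Grow_With_Data nums k → Spec_Grow_With_Data nums k (Grow_With_Data nums k)

-- ===== LEMMAS AND PROOFS =====

-- the window nums[l:r) as a list
def win (nums : List Int) (l r : Nat) : List Int := (nums.drop l).take (r - l)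

-- "every value occurs at most k times in nums[l:r)"
def validB (nums : List Int) (k : Int) (l r : Nat) : Bool :=
  (win nums l r).all (fun v => ((win nums l r).count v : Int) ≤ k)

theorem validB_self (nums : List Int) (k : Int) (r : Nat) : validB nums k r r = true := by
  simp [validB, win]

-- the least valid start of a window ending (exclusively) at r
def minL (nums : List Int) (k : Int) (r : Nat) : Nat :=
  Nat.find (p := fun l => validB nums k l r = true) ⟨r, validB_self nums k r⟩

theorem validB_true_iff (nums : List Int) (k : Int) (l r : Nat) :
    validB nums k l r = true ↔ ∀ v ∈ win nums l r, ((win nums l r).count v : Int) ≤ k := by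
  simp [validB]

theorem win_succ (nums : List Int) {l r : Nat} (h1 : l ≤ r) (h2 : r < nums.length) :
    win nums l (r + 1) = win nums l r ++ [nums[r]] := by
  unfold win
  rw [show r + 1 - l = (r - l) + 1 from by omega, List.take_succ]
  congr 1
  rw [List.getElem?_drop, show l + (r - l) = r from by omega,
    List.getElem?_eq_getElem h2]
  rfl

theorem win_cons (nums : List Int) {l r : Nat} (h1 : l < r) (h2 : l < nums.length) :
    win nums l r = nums[l] :: win nums (l + 1) r := by
  unfold win
  rw [List.drop_eq_getElem_cons h2,
    show r - l = (r - (l + 1)) + 1 from by omega, List.take_succ_cons]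

theorem win_sublist (nums : List Int) {l l' r : Nat} (h : l ≤ l') :
    (win nums l' r).Sublist (win nums l r) := by
  have heq : win nums l' r = (win nums l r).drop (l' - l) := by
    unfold win
    rw [List.drop_take, List.drop_drop, show l + (l' - l) = l' from by omega,
      show r - l - (l' - l) = r - l' from by omega]
  rw [heq]
  exact List.drop_sublist _ _

theorem count_le_left (nums : List Int) {l l' r : Nat} (h : l ≤ l') (v : Int) :
    (win nums l' r).count v ≤ (win nums l r).count v :=
  (win_sublist nums h).count_le v

theorem minL_le (nums : List Int) (k : Int) {l r : Nat}
    (hv : validB nums k l r = true) : minL nums k r ≤ l :=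
  Nat.find_min' _ hv

theorem minL_le_r (nums : List Int) (k : Int) (r : Nat) : minL nums k r ≤ r :=
  minL_le nums k (validB_self nums k r)

theorem minL_spec (nums : List Int) (k : Int) (r : Nat) :
    validB nums k (minL nums k r) r = true :=
  Nat.find_spec (p := fun l => validB nums k l r = true) ⟨r, validB_self nums k r⟩

theorem minL_min (nums : List Int) (k : Int) {l r : Nat} (h : l < minL nums k r) :
    ¬ validB nums k l r = true :=
  Nat.find_min _ h

theorem minL_eq (nums : List Int) (k : Int) {l r : Nat}
    (h1 : validB nums k l r = true) (h2 : ∀ l0 < l, ¬ validB nums k l0 r = true) :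
    minL nums k r = l := by
  refine le_antisymm (minL_le nums k h1) ?_
  by_contra hcon
  push_neg at hcon
  exact h2 _ hcon (minL_spec nums k r)

theorem cnt_succ (nums : List Int) {l r : Nat} (h1 : l ≤ r) (h2 : r < nums.length) (v : Int) :
    (win nums l (r + 1)).count v
      = (win nums l r).count v + (if nums[r] = v then 1 else 0) := by
  rw [win_succ nums h1 h2]
  simp [List.count_append, List.count_cons, List.count_nil]

theorem cnt_cons (nums : List Int) {l r : Nat} (h1 : l < r) (h2 : l < nums.length) (v : Int) :
    (win nums l r).count v
      = (win nums (l + 1) r).count v + (if nums[l] = v then 1 else 0) := by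
  rw [win_cons nums h1 h2]
  simp [List.count_cons]

-- validity restricted to a sub-window ending one earlier
theorem valid_shrink_right (nums : List Int) (k : Int) {l r : Nat}
    (h1 : l ≤ r) (h2 : r < nums.length)
    (hv : validB nums k l (r + 1) = true) : validB nums k l r = true := by
  rw [validB_true_iff] at hv ⊢
  intro v hmem
  have hsub : (win nums l r).Sublist (win nums l (r + 1)) := by
    rw [win_succ nums h1 h2]; exact List.sublist_append_left _ _
  have := hv v (hsub.subset hmem)
  have hc := hsub.count_le v
  omega

-- B's backward scan from r stops exactly at the least valid start
theorem bDown_eq (nums : List Int) (k : Int) (hk : 0 ≤ k) (r : Nat) (hr : r < nums.length) :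
    ∀ l, l ≤ r + 1 → ∀ cnt : PySem.Dict Int Int,
      (∀ v, cnt.getD v 0 = ((win nums l (r + 1)).count v : Int)) →
      validB nums k l (r + 1) = true →
      bDown nums k ((List.range l).reverse) cnt l = minL nums k (r + 1) := by
  intro l
  induction l with
  | zero =>
    intro hl cnt Hc Hv
    simp only [List.range_zero, List.reverse_nil, bDown]
    exact (minL_eq nums k Hv (fun l0 h => absurd h (Nat.not_lt_zero _))).symm
  | succ l' ih =>
    intro hl cnt Hc Hv
    have hl'n : l' < nums.length := by omega
    have hl'r : l' < r + 1 := by omega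
    have hval : nums.getD l' 0 = nums[l'] := List.getD_eq_getElem nums 0 hl'n
    rw [List.range_succ, List.reverse_append, List.reverse_singleton, List.singleton_append]
    simp only [bDown]
    have hcv := cnt_cons nums hl'r hl'n nums[l']
    rw [if_pos rfl] at hcv
    have hc : cnt.getD (nums.getD l' 0) 0 + 1 = ((win nums l' (r + 1)).count nums[l'] : Int) := by
      rw [hval, Hc nums[l'], hcv]
      push_cast
      ring
    by_cases hbig : cnt.getD (nums.getD l' 0) 0 + 1 > k
    · rw [if_pos hbig]
      refine (minL_eq nums k Hv ?_).symm
      intro l0 hl0 hvalid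
      have h1 : ((win nums l' (r + 1)).count nums[l'] : Int) > k := by rw [← hc]; exact hbig
      have h2 := count_le_left nums (show l0 ≤ l' by omega) (r := r + 1) nums[l']
      have hmem : nums[l'] ∈ win nums l0 (r + 1) := by
        apply List.count_pos_iff.mp
        omega
      have h3 := (validB_true_iff nums k l0 (r + 1)).mp hvalid nums[l'] hmem
      omega
    · rw [if_neg hbig]
      apply ih (by omega)
      · intro y
        rw [PySem.Dict.getD_insert]
        by_cases hy : y = nums.getD l' 0
        · rw [if_pos hy, hy, hval, Hc nums[l'], hcv]
          push_cast
          ring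
        · rw [if_neg hy, Hc y]
          have hcy := cnt_cons nums hl'r hl'n y
          rw [if_neg (fun h => hy (by rw [hval]; exact h.symm))] at hcy
          rw [hcy]
          simp
      · rw [validB_true_iff]
        intro y hymem
        rw [win_cons nums hl'r hl'n] at hymem
        have hcy := cnt_cons nums hl'r hl'n y
        by_cases hy : y = nums[l']
        · rw [hy, hcv]
          have h4 := Hc nums[l']
          rw [hval] at hbig
          push_cast
          omega
        · rw [if_neg (fun h => hy h.symm), Nat.add_zero] at hcy
          rw [hcy]
          rcases List.mem_cons.mp hymem with h | h
          · exact absurd h hy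
          · exact (validB_true_iff nums k (l' + 1) (r + 1)).mp Hv y h

-- the shrink loop ends exactly at the least valid start, with freq = the window's counter
theorem aShrink_spec (nums : List Int) (k : Int) (hk : 0 ≤ k) (i : Nat) (hi : i < nums.length) :
    ∀ fuel l (freq : PySem.Dict Int Int), i + 1 - l ≤ fuel → l ≤ i + 1 →
      (∀ v', freq.getD v' 0 = ((win nums l (i + 1)).count v' : Int)) →
      (∀ l0 < l, ¬ validB nums k l0 (i + 1) = true) →
      (∀ v', v' ≠ nums[i] → ((win nums l (i + 1)).count v' : Int) ≤ k) →
      (aShrink nums k nums[i] freq l).2 = minL nums k (i + 1) ∧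
        (∀ v', (aShrink nums k nums[i] freq l).1.getD v' 0
          = ((win nums (aShrink nums k nums[i] freq l).2 (i + 1)).count v' : Int)) := by
  intro fuel
  induction fuel with
  | zero =>
    intro l freq hf hl Hf Hmin Hother
    have hl' : l = i + 1 := by omega
    subst hl'
    have hwin : win nums (i + 1) (i + 1) = [] := by simp [win]
    have hcond : ¬ freq.getD nums[i] 0 > k := by
      rw [Hf, hwin]; simp; omega
    rw [aShrink, if_neg hcond]
    exact ⟨(minL_eq nums k (validB_self nums k (i + 1)) Hmin).symm, fun v' => Hf v'⟩
  | succ fuel ih =>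
    intro l freq hf hl Hf Hmin Hother
    by_cases hcond : freq.getD nums[i] 0 > k
    · -- loop body runs
      have hcnt : ((win nums l (i + 1)).count nums[i] : Int) > k := by rw [← Hf]; exact hcond
      have hlt : l < i + 1 := by
        by_contra h
        have : l = i + 1 := by omega
        subst this
        simp [win] at hcnt
        omega
      have hlen : l < nums.length := by omega
      have hmem : nums[i] ∈ win nums l (i + 1) := by
        apply List.count_pos_iff.mp
        omega
      rw [aShrink, if_pos hcond, dif_pos hlen]
      apply ih
      · omega
      · omega
      · -- new freq is the counter of win (l+1) (i+1)
        intro v'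
        rw [PySem.Dict.getD_insert]
        by_cases hv' : v' = nums[l]
        · rw [if_pos hv', hv', Hf nums[l]]
          have hc := cnt_cons nums hlt hlen nums[l]
          rw [if_pos rfl] at hc
          rw [hc]
          push_cast
          ring
        · rw [if_neg hv', Hf v']
          have hc := cnt_cons nums hlt hlen v'
          rw [if_neg (fun h => hv' h.symm)] at hc
          rw [hc]
          simp
      · -- every start < l+1 is invalid
        intro l0 hl0
        rcases Nat.lt_or_ge l0 l with h | h
        · exact Hmin l0 h
        · have : l0 = l := by omega
          subst this
          rw [validB_true_iff]
          push_neg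
          exact ⟨nums[i], hmem, by omega⟩
      · -- other values stay within k
        intro v' hv'
        have h1 := Hother v' hv'
        have hc := count_le_left nums (show l ≤ l + 1 by omega) (r := i + 1) v'
        have hc' : ((win nums (l + 1) (i + 1)).count v' : Int)
            ≤ ((win nums l (i + 1)).count v' : Int) := by exact_mod_cast hc
        exact le_trans hc' h1
    · -- loop exits
      rw [aShrink, if_neg hcond]
      have hvalid : validB nums k l (i + 1) = true := by
        rw [validB_true_iff]
        intro v hvmem
        by_cases hv : v = nums[i]
        · subst hv
          rw [← Hf]; exact not_lt.mp hcond
        · exact Hother v hv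
      exact ⟨(minL_eq nums k hvalid Hmin).symm, fun v' => Hf v'⟩

-- A's main loop, from position i on, computes the reference fold over the remaining indices
theorem A_fold (nums : List Int) (k : Int) (hk : 0 ≤ k) :
    ∀ rest i, nums.drop i = rest → i ≤ nums.length →
      ∀ (freq : PySem.Dict Int Int) (m : Int),
        (∀ v', freq.getD v' 0 = ((win nums (minL nums k i) i).count v' : Int)) →
        ((PySem.List.enumerate rest (i : Int)).foldl (aStep nums k)
            (freq, minL nums k i, m)).2.2
          = (List.range' i (nums.length - i)).foldl
              (fun (best : Int) (r : Nat) =>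
                max best ((r : Int) - (minL nums k (r + 1) : Int) + 1)) m := by
  intro rest
  induction rest with
  | nil =>
    intro i hdrop hi freq m Hf
    have : nums.length ≤ i := List.drop_eq_nil_iff.mp hdrop
    rw [show nums.length - i = 0 from by omega]
    simp [PySem.List.enumerate_nil]
  | cons val rest' ih =>
    intro i hdrop hi freq m Hf
    have hi' : i < nums.length := by
      rcases Nat.lt_or_ge i nums.length with h | h
      · exact h
      · rw [List.drop_eq_nil_iff.mpr h] at hdrop; cases hdrop
    have hsplit := List.drop_eq_getElem_cons hi' (l := nums)
    rw [hdrop] at hsplit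
    rw [List.cons.injEq] at hsplit
    obtain ⟨hval, hrest'⟩ := hsplit
    have hrest : nums.drop (i + 1) = rest' := hrest'.symm
    rw [PySem.List.enumerate_cons, List.foldl_cons]
    simp only [aStep]
    rw [hval]
    have hml := minL_le_r nums k i
    have hspec := aShrink_spec nums k hk i hi' (i + 1 - minL nums k i) (minL nums k i)
      (freq.insert nums[i] (freq.getD nums[i] 0 + 1)) (by omega) (by omega)
      (by
        intro v'
        rw [PySem.Dict.getD_insert]
        have hc := cnt_succ nums (show minL nums k i ≤ i by omega) hi' v'
        by_cases hv' : v' = nums[i]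
        · rw [if_pos hv', hv', Hf nums[i]]
          rw [hv', if_pos rfl] at hc
          rw [hc]
          push_cast
          ring
        · rw [if_neg hv', Hf v']
          rw [if_neg (fun h => hv' h.symm)] at hc
          rw [hc]
          simp)
      (by
        intro l0 hl0
        have h1 := minL_min nums k hl0
        intro hv
        exact h1 (valid_shrink_right nums k (by omega) hi' hv))
      (by
        intro v' hv'
        have hc := cnt_succ nums (show minL nums k i ≤ i by omega) hi' v'
        rw [if_neg (fun h => hv' h.symm), Nat.add_zero] at hc
        rw [hc]
        by_cases hmem : v' ∈ win nums (minL nums k i) i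
        · exact (validB_true_iff nums k _ i).mp (minL_spec nums k i) v' hmem
        · rw [List.count_eq_zero_of_not_mem hmem]
          push_cast
          omega)
    obtain ⟨h2, hFd⟩ := hspec
    rw [h2] at hFd
    rw [h2]
    rw [show nums.length - i = (nums.length - (i + 1)) + 1 from by omega,
      List.range'_succ, List.foldl_cons]
    have hcast : (i : Int) + 1 = ((i + 1 : Nat) : Int) := by push_cast; ring
    rw [hcast]
    exact ih (i + 1) hrest (by omega) _ _ hFd

theorem main_eq (nums : List Int) (k : Int) (hk : 0 ≤ k) :
    Grow_With_Data nums k = Grow_With_Data_alt nums k := by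
  unfold Grow_With_Data Grow_With_Data_alt
  have hB : ∀ (best : Int) (r : Nat), r ∈ List.range nums.length →
      max best ((r : Int)
        - (bDown nums k ((List.range (r + 1)).reverse) PySem.Dict.empty (r + 1) : Int) + 1)
      = max best ((r : Int) - (minL nums k (r + 1) : Int) + 1) := by
    intro best r hmem
    rw [bDown_eq nums k hk r (List.mem_range.mp hmem) (r + 1) le_rfl PySem.Dict.empty
      (by intro v; simp [win, PySem.Dict.getD_empty]) (validB_self nums k (r + 1))]
  have hfold := List.foldl_ext
    (f := fun (best : Int) (r : Nat) =>
      max best ((r : Int)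
        - (bDown nums k ((List.range (r + 1)).reverse) PySem.Dict.empty (r + 1) : Int) + 1))
    (g := fun (best : Int) (r : Nat) => max best ((r : Int) - (minL nums k (r + 1) : Int) + 1))
    (0 : Int) (l := List.range nums.length) hB
  rw [hfold, List.range_eq_range']
  have h0 : minL nums k 0 = 0 := Nat.le_zero.mp (minL_le_r nums k 0)
  have hA := A_fold nums k hk nums 0 rfl (Nat.zero_le _) PySem.Dict.empty 0
    (by intro v'; simp [win, PySem.Dict.getD_empty])
  rw [h0, Nat.sub_zero] at hA
  exact hA

-- ===== VERDICT (by name: the statement is the Claim_ definition above) =====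
theorem Grow_With_Data_spec : Claim_equal_Grow_With_Data := by
  intro nums k hdom hpre
  show Grow_With_Data nums k = Grow_With_Data_alt nums k
  rcases hpre with h | hk
  · subst h; rfl
  · exact main_eq nums k hk
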